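-- pv_equiv track=rewrite | github.com/fatezy/Algorithm | leetCode/backtracking/401readBinaryWatch.py | readBinaryWatch3
-- ===== SOURCE A (Python) =====
-- def readBinaryWatch3(n): # 回溯解法
--
--     def dfs(n, hours, mins, idx):
--         if hours >= 12 or mins > 59: return
--         if not n:
--             res.append(str(hours) + ":" + "0" * (mins < 10) + str(mins))
--             return
--         for i in range(idx, 10):
--             if i < 4:
--                 dfs(n - 1, hours | (1 << i), mins, i + 1)
--             else:
--                 k = i - 4
--                 dfs(n - 1, hours, mins | (1 << k), i + 1)
--
--     res = []
--     dfs(n, 0, 0, 0)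
--     return res
-- ===== SOURCE B (Python) =====
-- def readBinaryWatch3(n):  # generate-then-filter over position combinations
--     if n < 0:
--         return []
--
--     def combos(k, start):  # all k-subsets of range(start, 10), lexicographic
--         if k == 0:
--             return [[]]
--         return [[i] + rest for i in range(start, 11 - k) for rest in combos(k - 1, i + 1)]
--
--     out = []
--     for combo in combos(n, 0):
--         hours = sum(1 << i for i in combo if i < 4)
--         mins = sum(1 << (i - 4) for i in combo if i >= 4)
--         if hours < 12 and mins <= 59:
--             out.append(str(hours) + ":" + "0" * (mins < 10) + str(mins))
--     return out
-- ===== Notes on version B (the rewrite author's own statement) =====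
-- stated objective: alternative
-- what changed: Replaced the pruned backtracking DFS that threads hours/mins bitmasks through recursion with a generate-then-filter pipeline: explicitly build each n-element combination of the 10 LED positions in lexicographic order, then compute hours/minutes by summing bit weights, filter out invalid times, and format.
import Mathlib
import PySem

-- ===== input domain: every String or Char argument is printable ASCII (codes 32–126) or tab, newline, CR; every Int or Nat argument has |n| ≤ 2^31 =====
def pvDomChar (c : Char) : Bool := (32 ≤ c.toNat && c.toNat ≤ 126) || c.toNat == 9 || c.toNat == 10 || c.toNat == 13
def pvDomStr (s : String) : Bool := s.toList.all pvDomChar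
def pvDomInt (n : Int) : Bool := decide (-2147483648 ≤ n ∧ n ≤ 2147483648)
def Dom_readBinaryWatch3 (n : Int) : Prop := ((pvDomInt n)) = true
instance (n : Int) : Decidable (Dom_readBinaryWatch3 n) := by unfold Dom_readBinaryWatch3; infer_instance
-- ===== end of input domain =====

-- B is a generate-then-filter rewrite (build each n-subset of the 10 LED positions, then
-- compute/filter/format) replacing A's pruned backtracking DFS; same return value, no side effects.

-- ===== PORT A =====
-- dfs(n, hours, mins, idx) with res threaded as an accumulator; fuel = 11 bounds the call
-- depth (idx strictly increases toward 10, so 11 levels suffice and fuel never runs out).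
def pvDfsA : Nat → Int → Int → Int → Int → List String → List String
  | 0, _, _, _, _, res => res
  | fuel + 1, n, hours, mins, idx, res =>
    if hours ≥ 12 ∨ mins > 59 then res
    else if n = 0 then
      res ++ [PySem.Int.toStr hours ++ ":" ++ (if mins < 10 then "0" else "") ++ PySem.Int.toStr mins]
    else
      (PySem.List.pyRange idx 10 1).foldl
        (fun acc (i : Int) =>
          if i < 4 then
            pvDfsA fuel (n - 1) (PySem.Int.bor hours ((1 : Int) <<< i.toNat)) mins (i + 1) acc
          else
            pvDfsA fuel (n - 1) hours (PySem.Int.bor mins ((1 : Int) <<< (i - 4).toNat)) (i + 1) acc)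
        res

def readBinaryWatch3 (n : Int) : List String := pvDfsA 11 n 0 0 0 []

-- ===== PORT B =====
-- combos(k, start): all k-element ascending subsets of range(start, 10), lexicographic.
def pvCombosB : Nat → Int → List (List Int)
  | 0, _ => [[]]
  | k + 1, start =>
    (PySem.List.pyRange start (11 - (k + 1 : Int)) 1).flatMap
      (fun i => (pvCombosB k (i + 1)).map (fun rest => i :: rest))

def readBinaryWatch3_alt (n : Int) : List String :=
  if n < 0 then []
  else
    (pvCombosB n.toNat 0).foldl
      (fun out combo =>
        let hours : Int := ((combo.filter (fun i => i < 4)).map (fun i => (1 : Int) <<< i.toNat)).sum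
        let mins : Int := ((combo.filter (fun i => i ≥ 4)).map (fun i => (1 : Int) <<< (i - 4).toNat)).sum
        if hours < 12 ∧ mins ≤ 59 then
          out ++ [PySem.Int.toStr hours ++ ":" ++ (if mins < 10 then "0" else "") ++ PySem.Int.toStr mins]
        else out)
      []

-- ===== PRECONDITION & SPEC =====
def Spec_readBinaryWatch3 (n : Int) (out : List String) : Prop := out = readBinaryWatch3_alt n
instance (n : Int) (out : List String) : Decidable (Spec_readBinaryWatch3 n out) := by unfold Spec_readBinaryWatch3; infer_instance

-- ===== CLAIM (what is proved, stated in full; the proofs are below) =====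
def Claim_equal_readBinaryWatch3 : Prop := ∀ (n : Int), Dom_readBinaryWatch3 n → Spec_readBinaryWatch3 n (readBinaryWatch3 n)

-- ===== LEMMAS AND PROOFS =====

-- a fold whose step fixes the accumulator on every list element fixes it on the whole list
theorem pvFoldl_fixed {α β : Type} (f : β → α → β) (l : List α) (b : β)
    (h : ∀ a x, x ∈ l → f a x = a) : l.foldl f b = b := by
  induction l generalizing b with
  | nil => rfl
  | cons x xs ih =>
    simp only [List.foldl_cons, h b x (by simp)]
    exact ih b (fun a y hy => h a y (List.mem_cons_of_mem _ hy))

-- A's dfs appends nothing when n is negative (the `not n` test never fires)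
theorem pvDfsA_neg (fuel : Nat) : ∀ (n hours mins idx : Int) (res : List String),
    n < 0 → pvDfsA fuel n hours mins idx res = res := by
  induction fuel with
  | zero => intro n hours mins idx res _; rfl
  | succ f ih =>
    intro n hours mins idx res hn
    unfold pvDfsA
    split
    · rfl
    · rw [if_neg (by omega)]
      exact pvFoldl_fixed _ _ _ (fun acc i _ => by
        split <;> exact ih _ _ _ _ _ (by omega))

-- A's dfs appends nothing when more LEDs remain to light than positions remain to try
theorem pvDfsA_big (fuel : Nat) : ∀ (n hours mins idx : Int) (res : List String),
    idx ≤ 10 → 10 - idx < n → pvDfsA fuel n hours mins idx res = res := by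
  induction fuel with
  | zero => intro n hours mins idx res _ _; rfl
  | succ f ih =>
    intro n hours mins idx res hidx hn
    unfold pvDfsA
    split
    · rfl
    · rw [if_neg (by omega)]
      refine pvFoldl_fixed _ _ _ (fun acc i hi => ?_)
      have hmem := (PySem.List.mem_pyRange_one (a := idx) (b := 10) (x := i)).1 hi
      split <;> exact ih _ _ _ _ _ (by omega) (by omega)

-- B yields nothing when more than 10 positions are requested (the first range is empty)
theorem pvCombosB_big (k : Nat) (start : Int) (hs : 0 ≤ start) (hk : 11 ≤ k) :
    pvCombosB k start = [] := by
  obtain ⟨j, rfl⟩ : ∃ j, k = j + 1 := ⟨k - 1, by omega⟩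
  unfold pvCombosB
  rw [show PySem.List.pyRange start (11 - (j + 1 : Int)) 1 = [] from by
    rw [PySem.List.pyRange_one, show (11 - (j + 1 : Int) - start).toNat = 0 by omega]
    rfl]
  rfl

-- ===== VERDICT (by name: the statement is the Claim_ definition above) =====
set_option maxRecDepth 40000 in
theorem readBinaryWatch3_spec : Claim_equal_readBinaryWatch3 := by
  intro n _
  unfold Spec_readBinaryWatch3
  by_cases hneg : n < 0
  · rw [show readBinaryWatch3 n = [] from pvDfsA_neg 11 n 0 0 0 [] hneg]
    unfold readBinaryWatch3_alt
    rw [if_pos hneg]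
  · by_cases hbig : 10 < n
    · rw [show readBinaryWatch3 n = [] from pvDfsA_big 11 n 0 0 0 [] (by omega) (by omega)]
      unfold readBinaryWatch3_alt
      rw [if_neg hneg, pvCombosB_big n.toNat 0 (by omega) (by omega)]
      rfl
    · have h0 : 0 ≤ n := by omega
      have h10 : n ≤ 10 := by omega
      interval_cases n <;> decide
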